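-- pv_equiv track=rewrite | github.com/NUSTM/ACOS | Extract-Classify-ACOS/eval_metrics.py | getTextType
-- ===== SOURCE A (Python) =====
-- def getTextType(gold):
--     text_type = {}
--     for text in gold:
--         if text not in text_type:
--             text_type[text] = []
--
--         for ele in gold[text]:
--             if 4 not in text_type[text]:
--                 text_type[text].append(4)
--             if '-1' not in ele[2] and '-1' not in ele[3]:
--                 if 0 not in text_type[text]:
--                     text_type[text].append(0)
--             elif '-1' in ele[2] and '-1' not in ele[3]:
--                 if 1 not in text_type[text]:
--                     text_type[text].append(1)
--             elif '-1' not in ele[2] and '-1' in ele[3]: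
--                 if 2 not in text_type[text]:
--                     text_type[text].append(2)
--             elif '-1' in ele[2] and '-1' in ele[3]:
--                 if 3 not in text_type[text]:
--                     text_type[text].append(3)
--
--     return text_type
-- ===== SOURCE B (Python) =====
-- def getTextType(gold):
--     res = {}
--     for text, eles in gold.items():
--         codes = [('-1' in e[2]) + 2 * ('-1' in e[3]) for e in eles]
--         res[text] = [4] + sorted(set(codes), key=codes.index) if codes else []
--     return res
-- ===== Notes on version B (the rewrite author's own statement) =====
-- stated objective: alternative
-- what changed: B first maps each annotation element to a 0-3 category code in closed form, then reconstructs A's per-text list as [4] plus the SET of codes sorted by first-occurrence index (sorted(set(codes), key=codes.index)), instead of A's single pass with membership-guarded appends into the growing list.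
import Mathlib
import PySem

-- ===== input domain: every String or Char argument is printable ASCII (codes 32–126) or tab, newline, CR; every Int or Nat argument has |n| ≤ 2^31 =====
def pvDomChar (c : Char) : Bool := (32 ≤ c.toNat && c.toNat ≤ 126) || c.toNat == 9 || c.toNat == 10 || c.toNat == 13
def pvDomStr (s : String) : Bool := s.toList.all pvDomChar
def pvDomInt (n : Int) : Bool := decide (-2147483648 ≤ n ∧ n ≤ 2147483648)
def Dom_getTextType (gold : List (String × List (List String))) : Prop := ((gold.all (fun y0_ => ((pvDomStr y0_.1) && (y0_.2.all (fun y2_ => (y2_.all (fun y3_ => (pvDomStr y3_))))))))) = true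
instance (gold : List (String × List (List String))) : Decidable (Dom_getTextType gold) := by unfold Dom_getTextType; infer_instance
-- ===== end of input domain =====

-- B maps each element to a 0-3 code in closed form and rebuilds A's per-text list as
-- [4] plus the set of codes sorted by first-occurrence index, replacing A's
-- membership-guarded append pass (alternative decomposition).

-- ===== PORT A =====
def getTextType (gold : List (String × List (List String))) : List (String × List Int) :=
  (gold.foldl
    (fun tt p =>
      let text := p.1
      let tt := if tt.contains text then tt else tt.insert text []
      ((PySem.Dict.mk gold).getD text []).foldl
        (fun tt ele =>
          let tt := if (tt.getD text []).contains 4 then tt else tt.modify text [] (· ++ [4])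
          let a := PySem.Str.isIn "-1" (PySem.List.pyGetD ele 2 "")
          let b := PySem.Str.isIn "-1" (PySem.List.pyGetD ele 3 "")
          if !a && !b then
            (if (tt.getD text []).contains 0 then tt else tt.modify text [] (· ++ [0]))
          else if a && !b then
            (if (tt.getD text []).contains 1 then tt else tt.modify text [] (· ++ [1]))
          else if !a && b then
            (if (tt.getD text []).contains 2 then tt else tt.modify text [] (· ++ [2]))
          else if a && b then
            (if (tt.getD text []).contains 3 then tt else tt.modify text [] (· ++ [3]))
          else tt)
        tt)
    (PySem.Dict.empty : PySem.Dict String (List Int))).items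

-- ===== PORT B =====
def getTextType_alt (gold : List (String × List (List String))) : List (String × List Int) :=
  (gold.foldl
    (fun res p =>
      let codes : List Int := p.2.map (fun e =>
        (if PySem.Str.isIn "-1" (PySem.List.pyGetD e 2 "") then (1 : Int) else 0)
          + 2 * (if PySem.Str.isIn "-1" (PySem.List.pyGetD e 3 "") then 1 else 0))
      res.insert p.1
        (if codes.isEmpty then []
         else 4 :: PySem.List.sorted (PySem.Set.ofList codes)
                (fun c => (PySem.List.index? codes c).getD 0) false))
    (PySem.Dict.empty : PySem.Dict String (List Int))).items

-- ===== PRECONDITION & SPEC =====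
-- Pre_ excludes (a) annotation elements with fewer than four fields, on which the Python raises
-- IndexError, and (b) association lists with duplicate text keys, which no Python dict input can
-- represent (the Lean assoc-list encoding alone admits them).
def Pre_getTextType (gold : List (String × List (List String))) : Prop :=
  (gold.map Prod.fst).Nodup ∧ ∀ p ∈ gold, ∀ ele ∈ p.2, 4 ≤ ele.length
instance (gold : List (String × List (List String))) : Decidable (Pre_getTextType gold) := by unfold Pre_getTextType; infer_instance

def pvWitness_getTextType : (List (String × List (List String))) :=
  [("t", [["a", "b", "x-1", "y"], ["a", "b", "x", "y-1z"]]), ("u", [])]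

def Spec_getTextType (gold : List (String × List (List String))) (out : List (String × List Int)) : Prop := out = getTextType_alt gold
instance (gold : List (String × List (List String))) (out : List (String × List Int)) : Decidable (Spec_getTextType gold out) := by unfold Spec_getTextType; infer_instance

-- ===== CLAIM (what is proved, stated in full; the proofs are below) =====
def Claim_equal_getTextType : Prop := ∀ (gold : List (String × List (List String))), Dom_getTextType gold → Pre_getTextType gold → Spec_getTextType gold (getTextType gold)

-- ===== LEMMAS AND PROOFS =====

-- the category code B computes in closed form
def pvCode (ele : List String) : Int :=
  (if PySem.Str.isIn "-1" (PySem.List.pyGetD ele 2 "") then 1 else 0)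
    + 2 * (if PySem.Str.isIn "-1" (PySem.List.pyGetD ele 3 "") then 1 else 0)

-- A's inner-loop body, named for the proofs (definitionally the lambda inside the port)
def pvInner (text : String) (tt : PySem.Dict String (List Int)) (ele : List String) :
    PySem.Dict String (List Int) :=
  let tt := if (tt.getD text []).contains 4 then tt else tt.modify text [] (· ++ [4])
  let a := PySem.Str.isIn "-1" (PySem.List.pyGetD ele 2 "")
  let b := PySem.Str.isIn "-1" (PySem.List.pyGetD ele 3 "")
  if !a && !b then
    (if (tt.getD text []).contains 0 then tt else tt.modify text [] (· ++ [0]))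
  else if a && !b then
    (if (tt.getD text []).contains 1 then tt else tt.modify text [] (· ++ [1]))
  else if !a && b then
    (if (tt.getD text []).contains 2 then tt else tt.modify text [] (· ++ [2]))
  else if a && b then
    (if (tt.getD text []).contains 3 then tt else tt.modify text [] (· ++ [3]))
  else tt

-- the per-text list A ends up with
def pvFinal (eles : List (List String)) : List Int :=
  eles.foldl (fun cur ele => PySem.Set.add (PySem.Set.add cur 4) (pvCode ele)) []

-- the per-text list B computes
def pvListB (eles : List (List String)) : List Int :=
  let codes := eles.map pvCode
  if codes.isEmpty then []
  else 4 :: PySem.List.sorted (PySem.Set.ofList codes)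
        (fun c => (PySem.List.index? codes c).getD 0) false

lemma pvCode_ne_four (e : List String) : pvCode e ≠ 4 := by
  unfold pvCode; split_ifs <;> norm_num

lemma modify_insert_self (d : PySem.Dict String (List Int)) (k : String) (v : List Int)
    (f : List Int → List Int) : (d.insert k v).modify k [] f = d.insert k (f v) := by
  simp [PySem.Dict.modify, PySem.Dict.getD_insert_self, PySem.Dict.insert_insert_self]

-- membership-guarded append on the list held at `text` is PySem.Set.add
lemma appendStep (tt : PySem.Dict String (List Int)) (text : String) (cur : List Int) (c : Int) :
    (if ((tt.insert text cur).getD text []).contains c then tt.insert text cur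
     else (tt.insert text cur).modify text [] (· ++ [c]))
      = tt.insert text (PySem.Set.add cur c) := by
  by_cases h : c ∈ cur
  · simp [PySem.Dict.getD_insert_self, PySem.Set.add, h]
  · simp [PySem.Dict.getD_insert_self, PySem.Set.add, h, modify_insert_self]

lemma stepA (tt : PySem.Dict String (List Int)) (text : String) (cur : List Int)
    (e : List String) :
    pvInner text (tt.insert text cur) e
      = tt.insert text (PySem.Set.add (PySem.Set.add cur 4) (pvCode e)) := by
  simp only [pvInner]
  rw [appendStep]
  cases ha : PySem.Str.isIn "-1" (PySem.List.pyGetD e 2 "") <;>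
  cases hb : PySem.Str.isIn "-1" (PySem.List.pyGetD e 3 "") <;>
    simp only [Bool.not_false, Bool.not_true, Bool.false_and, Bool.and_false,
      Bool.and_self, Bool.false_eq_true, if_false, if_true] <;>
    (rw [appendStep]; simp only [pvCode]; rw [ha, hb]; norm_num)

-- A's inner loop threads the dict but only ever touches key `text`
lemma innerA (eles : List (List String)) (tt : PySem.Dict String (List Int))
    (text : String) (cur : List Int) :
    eles.foldl (pvInner text) (tt.insert text cur)
      = tt.insert text
          (eles.foldl (fun cur ele => PySem.Set.add (PySem.Set.add cur 4) (pvCode ele)) cur) := by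
  induction eles generalizing cur with
  | nil => rfl
  | cons e rest ih => simp only [List.foldl_cons]; rw [stepA, ih]

-- adding 4 is a no-op once 4 is present, so A's accumulation is a fold of Set.add over the codes
lemma stepFold (eles : List (List String)) (cur : List Int) (h4 : (4 : Int) ∈ cur) :
    eles.foldl (fun cur ele => PySem.Set.add (PySem.Set.add cur 4) (pvCode ele)) cur
      = (eles.map pvCode).foldl PySem.Set.add cur := by
  induction eles generalizing cur with
  | nil => rfl
  | cons e rest ih =>
      simp only [List.foldl_cons, List.map_cons]
      rw [show PySem.Set.add cur 4 = cur by simp [PySem.Set.add, h4]]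
      exact ih _ (by rw [PySem.Set.mem_add]; exact Or.inl h4)

-- an element absent from the insertions stays at the head of a Set.add fold
lemma cons_foldl_add (xs : List Int) (s : List Int) (a : Int) (h : a ∉ xs) :
    xs.foldl PySem.Set.add (a :: s) = a :: xs.foldl PySem.Set.add s := by
  induction xs generalizing s with
  | nil => rfl
  | cons x rest ih =>
      have hxa : x ≠ a := fun he => h (he ▸ List.mem_cons_self)
      simp only [List.foldl_cons]
      rw [show PySem.Set.add (a :: s) x = a :: PySem.Set.add s x by
        by_cases hm : x ∈ s <;> simp [PySem.Set.add, hxa, hm]]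
      exact ih _ (fun hm => h (List.mem_cons_of_mem _ hm))

lemma four_not_mem_codes (eles : List (List String)) : (4 : Int) ∉ eles.map pvCode := by
  intro h
  obtain ⟨e, _, he⟩ := List.mem_map.mp h
  exact pvCode_ne_four e he

-- A's per-text list is 4 followed by the code set in first-occurrence order
lemma pvFinal_eq (eles : List (List String)) :
    pvFinal eles
      = if eles.isEmpty then [] else 4 :: PySem.Set.ofList (eles.map pvCode) := by
  cases eles with
  | nil => rfl
  | cons e rest =>
      simp only [pvFinal, List.foldl_cons, List.isEmpty_cons, if_false, Bool.false_eq_true]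
      rw [show PySem.Set.add (PySem.Set.add ([] : List Int) 4) (pvCode e)
            = (4 : Int) :: [pvCode e] by
        simp [PySem.Set.add, (pvCode_ne_four e)]]
      rw [stepFold rest _ (by simp)]
      rw [cons_foldl_add _ _ _ (four_not_mem_codes rest)]
      simp only [List.map_cons, PySem.Set.ofList_eq_foldl, List.foldl_cons]
      rfl

-- the first-occurrence list of distinct codes is strictly increasing in first index
lemma ofList_pairwise_idx (xs : List Int) :
    (PySem.Set.ofList xs).Pairwise
      (fun a b => (PySem.List.index? xs a).getD 0 < (PySem.List.index? xs b).getD 0) := by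
  induction xs using List.reverseRecOn with
  | nil => simp [PySem.Set.ofList]
  | append_singleton xs x ih =>
      have hof : PySem.Set.ofList (xs ++ [x]) = PySem.Set.add (PySem.Set.ofList xs) x := by
        simp [PySem.Set.ofList_eq_foldl, List.foldl_append]
      have hkey : ∀ a ∈ PySem.Set.ofList xs,
          (PySem.List.index? (xs ++ [x]) a).getD 0 = (PySem.List.index? xs a).getD 0 := by
        intro a ha
        rw [PySem.List.index?_append_of_mem _ ((PySem.Set.mem_ofList _ _).mp ha)]
      by_cases hx : x ∈ xs
      · rw [hof, show PySem.Set.add (PySem.Set.ofList xs) x = PySem.Set.ofList xs by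
          simp [PySem.Set.add, PySem.Set.mem_ofList, hx]]
        exact List.Pairwise.imp_of_mem
          (fun {a b} ha hb h => by rw [hkey a ha, hkey b hb]; exact h) ih
      · rw [hof, show PySem.Set.add (PySem.Set.ofList xs) x = PySem.Set.ofList xs ++ [x] by
          simp [PySem.Set.add, PySem.Set.mem_ofList, hx]]
        rw [List.pairwise_append]
        refine ⟨List.Pairwise.imp_of_mem
          (fun {a b} ha hb h => by rw [hkey a ha, hkey b hb]; exact h) ih,
          List.pairwise_singleton _ _, ?_⟩
        intro a ha b hb
        rw [List.mem_singleton] at hb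
        subst hb
        rw [hkey a ha, PySem.List.index?_append_singleton_self xs b hx]
        have hmem : a ∈ xs := (PySem.Set.mem_ofList _ _).mp ha
        obtain ⟨k, hk⟩ := Option.isSome_iff_exists.mp ((PySem.List.index?_isSome_iff _ _).mpr hmem)
        obtain ⟨hlt, -, -⟩ := PySem.List.getElem_of_index?_eq_some hk
        rw [hk]
        simpa using hlt

-- B's sort by first index returns the first-occurrence order unchanged
lemma pvListB_eq (eles : List (List String)) : pvListB eles = pvFinal eles := by
  rw [pvFinal_eq]
  cases eles with
  | nil => rfl
  | cons e rest =>
      simp only [pvListB, List.isEmpty_cons, List.map_cons, if_false, Bool.false_eq_true]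
      congr 1
      exact PySem.List.sorted_eq_of_perm_of_pairwise_lt _ _ _ (List.Perm.refl _)
        (ofList_pairwise_idx (pvCode e :: rest.map pvCode))

-- the outer loops agree on fresh keys
lemma outerEq (rest : List (String × List (List String))) (tt : PySem.Dict String (List Int))
    (hfresh : ∀ p ∈ rest, tt.contains p.1 = false)
    (hnd : (rest.map Prod.fst).Nodup) :
    rest.foldl
        (fun tt p =>
          p.2.foldl (pvInner p.1) (if tt.contains p.1 then tt else tt.insert p.1 [])) tt
      = rest.foldl (fun tt p => tt.insert p.1 (pvFinal p.2)) tt := by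
  induction rest generalizing tt with
  | nil => rfl
  | cons p rest ih =>
      simp only [List.foldl_cons]
      rw [hfresh p (by simp), if_neg (by simp), innerA p.2 tt p.1 []]
      · rw [show (List.foldl (fun cur ele => PySem.Set.add (PySem.Set.add cur 4) (pvCode ele)) [] p.2) = pvFinal p.2 from rfl]
        apply ih
        · intro q hq
          rw [PySem.Dict.contains_insert]
          simp only [List.map_cons, List.nodup_cons, List.mem_map] at hnd
          have h1 : q.1 ≠ p.1 := fun h => hnd.1 ⟨q, hq, h⟩
          simp [h1, hfresh q (List.mem_cons_of_mem _ hq)]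
        · exact (List.nodup_cons.mp hnd).2

-- ===== VERDICT (by name: the statement is the Claim_ definition above) =====
set_option maxHeartbeats 1000000 in
theorem getTextType_spec : Claim_equal_getTextType := by
  intro gold _ hpre
  obtain ⟨hnd, _⟩ := hpre
  unfold Spec_getTextType getTextType getTextType_alt
  congr 1
  have hlook : ∀ p ∈ gold, (PySem.Dict.mk gold).getD p.1 [] = p.2 := by
    intro p hp
    exact PySem.Dict.getD_of_mem_items (d := PySem.Dict.mk gold) (by exact hp)
      (by simpa [PySem.Dict.keys_mk] using hnd) []
  calc
    gold.foldl
        (fun tt p =>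
          let text := p.1
          let tt := if tt.contains text then tt else tt.insert text []
          ((PySem.Dict.mk gold).getD text []).foldl
            (fun tt ele =>
              let tt := if (tt.getD text []).contains 4 then tt else tt.modify text [] (· ++ [4])
              let a := PySem.Str.isIn "-1" (PySem.List.pyGetD ele 2 "")
              let b := PySem.Str.isIn "-1" (PySem.List.pyGetD ele 3 "")
              if !a && !b then
                (if (tt.getD text []).contains 0 then tt else tt.modify text [] (· ++ [0]))
              else if a && !b then
                (if (tt.getD text []).contains 1 then tt else tt.modify text [] (· ++ [1]))
              else if !a && b then
                (if (tt.getD text []).contains 2 then tt else tt.modify text [] (· ++ [2]))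
              else if a && b then
                (if (tt.getD text []).contains 3 then tt else tt.modify text [] (· ++ [3]))
              else tt)
            tt)
        (PySem.Dict.empty : PySem.Dict String (List Int))
      = gold.foldl
          (fun tt p =>
            ((PySem.Dict.mk gold).getD p.1 []).foldl (pvInner p.1)
              (if tt.contains p.1 then tt else tt.insert p.1 [])) PySem.Dict.empty := rfl
    _ = gold.foldl
          (fun tt p =>
            p.2.foldl (pvInner p.1)
              (if tt.contains p.1 then tt else tt.insert p.1 [])) PySem.Dict.empty :=
        by apply PySem.List.foldl_congr_mem; intro acc p hp; rw [hlook p hp]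
    _ = gold.foldl (fun tt p => tt.insert p.1 (pvFinal p.2)) PySem.Dict.empty :=
        outerEq gold _ (by simp [PySem.Dict.contains_empty]) hnd
    _ = gold.foldl
          (fun res p =>
            let codes : List Int := p.2.map (fun e =>
              (if PySem.Str.isIn "-1" (PySem.List.pyGetD e 2 "") then (1 : Int) else 0)
                + 2 * (if PySem.Str.isIn "-1" (PySem.List.pyGetD e 3 "") then 1 else 0))
            res.insert p.1
              (if codes.isEmpty then []
               else 4 :: PySem.List.sorted (PySem.Set.ofList codes)
                      (fun c => (PySem.List.index? codes c).getD 0) false)) PySem.Dict.empty :=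
        by
          apply PySem.List.foldl_congr_mem
          intro acc p hp
          show acc.insert p.1 (pvFinal p.2) = acc.insert p.1 (pvListB p.2)
          rw [pvListB_eq]
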